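-- pv_equiv track=rewrite | github.com/Pop-korn/ONNX2TFLite | src/converter/builtin/CvtSoftmax.py | getShapeForReshape
-- ===== SOURCE A (Python) =====
-- from typing import List
--
-- def getShapeForReshape(axis: int, oldShape: List[int]):
--     """ If ONNX Softmax uses special 'axis', return the shape the ONNX Operator
--         would reshape the input into before applying Softmax. """
--
--     newShape = []
--     tmp = 1
--     for i, dim in enumerate(oldShape):
--         if i == axis:
--             newShape.append(tmp)
--             tmp = dim
--         else:
--             tmp *= dim
--     newShape.append(tmp)
--
--     return newShape
-- ===== SOURCE B (Python) =====
-- from typing import List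
--
-- def _prod(xs):
--     p = 1
--     for x in xs:
--         p *= x
--     return p
--
-- def getShapeForReshape(axis: int, oldShape: List[int]):
--     if 0 <= axis < len(oldShape):
--         return [_prod(oldShape[:axis]), _prod(oldShape[axis:])]
--     return [_prod(oldShape)]
-- ===== Notes on version B (the rewrite author's own statement) =====
-- stated objective: simpler
-- what changed: Replaced the branch-inside-loop accumulator with a guard and two slice products: [prod(oldShape[:axis]), prod(oldShape[axis:])] when 0 <= axis < len(oldShape), else [prod(oldShape)].
import Mathlib
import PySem

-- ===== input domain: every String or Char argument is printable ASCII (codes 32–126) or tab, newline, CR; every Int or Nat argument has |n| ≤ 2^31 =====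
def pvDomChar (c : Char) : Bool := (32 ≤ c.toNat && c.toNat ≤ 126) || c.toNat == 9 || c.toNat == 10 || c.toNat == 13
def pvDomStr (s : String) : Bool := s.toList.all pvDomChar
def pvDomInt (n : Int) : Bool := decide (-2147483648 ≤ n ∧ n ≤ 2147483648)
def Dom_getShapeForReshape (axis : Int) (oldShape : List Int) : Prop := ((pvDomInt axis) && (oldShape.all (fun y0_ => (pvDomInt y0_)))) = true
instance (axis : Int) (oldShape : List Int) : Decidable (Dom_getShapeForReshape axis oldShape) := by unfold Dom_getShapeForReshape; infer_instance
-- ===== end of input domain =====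

-- B replaces A's branch-inside-loop accumulator with a guard and two slice products (objective: simpler).

-- ===== PORT A =====
-- the for-loop over enumerate(oldShape), state = (newShape, tmp), index i carried explicitly
def getShapeForReshapeLoop (axis : Int) : Nat → List Int → List Int → Int → (List Int × Int)
  | _, [], newShape, tmp => (newShape, tmp)
  | i, dim :: rest, newShape, tmp =>
    if (i : Int) = axis then getShapeForReshapeLoop axis (i + 1) rest (newShape ++ [tmp]) dim
    else getShapeForReshapeLoop axis (i + 1) rest newShape (tmp * dim)

def getShapeForReshape (axis : Int) (oldShape : List Int) : List Int :=
  let st := getShapeForReshapeLoop axis 0 oldShape [] 1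
  st.1 ++ [st.2]

-- ===== PORT B =====
-- _prod: p = 1; for x in xs: p *= x
def prodB (xs : List Int) : Int := xs.foldl (· * ·) 1

def getShapeForReshape_alt (axis : Int) (oldShape : List Int) : List Int :=
  if 0 ≤ axis ∧ axis < oldShape.length then
    [prodB (PySem.List.slice oldShape none (some axis)),
     prodB (PySem.List.slice oldShape (some axis) none)]
  else
    [prodB oldShape]

-- ===== PRECONDITION & SPEC =====
def Spec_getShapeForReshape (axis : Int) (oldShape : List Int) (out : List Int) : Prop := out = getShapeForReshape_alt axis oldShape
instance (axis : Int) (oldShape : List Int) (out : List Int) : Decidable (Spec_getShapeForReshape axis oldShape out) := by unfold Spec_getShapeForReshape; infer_instance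

-- ===== CLAIM (what is proved, stated in full; the proofs are below) =====
def Claim_equal_getShapeForReshape : Prop := ∀ (axis : Int) (oldShape : List Int), Dom_getShapeForReshape axis oldShape → Spec_getShapeForReshape axis oldShape (getShapeForReshape axis oldShape)

-- ===== LEMMAS AND PROOFS =====

theorem foldl_mul_eq (xs : List Int) (t : Int) : xs.foldl (· * ·) t = t * prodB xs := by
  induction xs generalizing t with
  | nil => simp [prodB]
  | cons d rest ih =>
    simp only [prodB, List.foldl_cons]
    rw [ih (t * d), ih (1 * d)]
    ring

theorem prodB_cons (d : Int) (rest : List Int) : prodB (d :: rest) = d * prodB rest := by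
  show List.foldl (· * ·) (1 * d) rest = d * prodB rest
  rw [foldl_mul_eq rest (1 * d)]
  ring

-- when no index in xs matches axis, the loop just multiplies everything into tmp
theorem loop_nomatch (axis : Int) (xs : List Int) (i : Nat) (acc : List Int) (tmp : Int)
    (h : ∀ j : Nat, i ≤ j → j < i + xs.length → (j : Int) ≠ axis) :
    getShapeForReshapeLoop axis i xs acc tmp = (acc, tmp * prodB xs) := by
  induction xs generalizing i acc tmp with
  | nil => simp [getShapeForReshapeLoop, prodB]
  | cons d rest ih =>
    have hne : (i : Int) ≠ axis := h i (le_refl i) (by simp only [List.length_cons]; omega)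
    simp only [getShapeForReshapeLoop, if_neg hne]
    rw [ih (i + 1) acc (tmp * d) (fun j hj1 hj2 => h j (by omega) (by simp at hj2 ⊢; omega))]
    rw [prodB_cons]; ring_nf

-- when index i + k (k < len) matches axis, the loop splits the product at k
theorem loop_match (axis : Int) (xs : List Int) (i : Nat) (acc : List Int) (tmp : Int) (k : Nat)
    (hk : k < xs.length) (hax : ((i + k : Nat) : Int) = axis) :
    getShapeForReshapeLoop axis i xs acc tmp
      = (acc ++ [tmp * prodB (xs.take k)], prodB (xs.drop k)) := by
  induction xs generalizing i acc tmp k with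
  | nil => simp at hk
  | cons d rest ih =>
    cases k with
    | zero =>
      have hi : (i : Int) = axis := by simpa using hax
      simp only [getShapeForReshapeLoop, if_pos hi]
      have hnom : ∀ j : Nat, i + 1 ≤ j → j < i + 1 + rest.length → (j : Int) ≠ axis := by
        intro j hj1 _ hje
        rw [← hi] at hje
        have : j = i := by exact_mod_cast hje
        omega
      rw [loop_nomatch axis rest (i + 1) (acc ++ [tmp]) d hnom]
      simp only [List.take_zero, List.drop_zero, prodB_cons]
      simp [prodB]
    | succ k' =>
      have hne : (i : Int) ≠ axis := by
        intro hie; rw [← hie] at hax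
        have : i + (k' + 1) = i := by exact_mod_cast hax
        omega
      simp only [getShapeForReshapeLoop, if_neg hne]
      rw [ih (i + 1) acc (tmp * d) k' (by simp at hk; omega) (by push_cast at hax ⊢; omega)]
      simp only [List.take_succ_cons, List.drop_succ_cons, prodB_cons]
      ring_nf

-- ===== VERDICT (by name: the statement is the Claim_ definition above) =====
theorem getShapeForReshape_spec : Claim_equal_getShapeForReshape := by
  intro axis oldShape _
  unfold Spec_getShapeForReshape getShapeForReshape getShapeForReshape_alt
  by_cases hin : 0 ≤ axis ∧ axis < oldShape.length
  · rw [if_pos hin]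
    obtain ⟨h0, hlt⟩ := hin
    obtain ⟨k, hk⟩ : ∃ k : Nat, axis = (k : Int) := ⟨axis.toNat, (Int.toNat_of_nonneg h0).symm⟩
    subst hk
    have hklt : k < oldShape.length := by exact_mod_cast hlt
    rw [loop_match ((k : Nat) : Int) oldShape 0 [] 1 k hklt (by push_cast; ring)]
    rw [PySem.List.slice_to_natCast, PySem.List.slice_from_natCast]
    simp
  · rw [if_neg hin]
    have hnom : ∀ j : Nat, 0 ≤ j → j < 0 + oldShape.length → (j : Int) ≠ axis := by
      intro j _ hj hje
      apply hin
      constructor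
      · rw [← hje]; exact_mod_cast Nat.zero_le j
      · rw [← hje]; exact_mod_cast (by omega : j < oldShape.length)
    rw [loop_nomatch axis oldShape 0 [] 1 hnom]
    simp
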